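-- pv_equiv track=rewrite | github.com/redlessme/advanced-ds-and-algorithm | A1/modified_kmp.py | computeSPx
-- ===== SOURCE A (Python) =====
-- CHARACTER = 75
--
-- def calculateZ(aString):
--     Z=[0]*len(aString)
--     left,right=0,0
--     for k in  range (1,len(aString)):
--         if k>right: #case 1
--             left=right=k
--             #until first mismatch
--             while(right<len(aString) and aString[right]==aString[right-left]):
--                 right+=1
--             Z[k]=right-left
--             right=right-1
--         else:#case2
--             k1=k-left
--             if Z[k1]<right-k+1:#case 2a: Z_k box is inside the Z_l box
--                 Z[k]=Z[k1]
--             else:#case2b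
--                 left=k
--                 while(right<len(aString) and aString[right]==aString[right-left]):
--                     right+=1
--                 Z[k]=right-k
--                 right-=1
--     return Z
--
-- def computeSPx(pat):
--     m=len(pat)
--     z=calculateZ(pat)
--     #The size of Spi is m*75, each sublist records the length of the longest proper suffix of pat[1...i] that matches its prefix, with the extra condition
--     # that pat[spi(x)+1]=x
--     SP=[ [0 for _ in range(CHARACTER)] for _ in range(m)]
--     for j in range(m-1,-1,-1):
--         #for each j,compute its i will record spi with the longest when multiple z_box with different start point j but same end point i
--         i=j+z[j]-1
--         if i==-1:# if i=-1 sp[i] will be recognised as the last value of SP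
--             break
--         SP[i][ord(pat[z[j]])-ord('0')]=z[j]#recording spi and the next character
--     return SP
-- ===== SOURCE B (Python) =====
-- CHARACTER = 75
--
-- def computeSPx(pat):
--     # Per-shift naive prefix matching, ascending shifts with first-write-wins
--     # (equals A's descending overwrite, since later shifts give shorter matches
--     # for the same end position); no Z-algorithm / z-box bookkeeping.
--     m = len(pat)
--     SP = [[0] * CHARACTER for _ in range(m)]
--     for j in range(1, m):
--         L = 0
--         while j + L < m and pat[j + L] == pat[L]:
--             L += 1
--         if L > 0:
--             row = SP[j + L - 1]
--             col = ord(pat[L]) - ord('0')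
--             if row[col] == 0:
--                 row[col] = L
--     return SP
-- ===== Notes on version B (the rewrite author's own statement) =====
-- stated objective: simpler
-- what changed: B drops the Z-algorithm (z-box bookkeeping, descending fill with break) entirely: for each shift j ascending it measures the prefix match directly with one scan and records it at its end position with first-write-wins, which equals A's descending-overwrite semantics.
import Mathlib
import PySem

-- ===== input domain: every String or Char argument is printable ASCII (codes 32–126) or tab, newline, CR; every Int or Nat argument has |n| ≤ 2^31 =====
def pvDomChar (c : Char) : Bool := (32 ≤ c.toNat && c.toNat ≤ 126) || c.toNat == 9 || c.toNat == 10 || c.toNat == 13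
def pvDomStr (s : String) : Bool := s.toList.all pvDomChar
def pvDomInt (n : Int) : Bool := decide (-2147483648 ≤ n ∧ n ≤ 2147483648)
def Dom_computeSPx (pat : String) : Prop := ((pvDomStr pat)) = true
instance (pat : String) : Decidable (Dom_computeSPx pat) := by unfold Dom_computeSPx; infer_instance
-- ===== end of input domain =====

-- B replaces the Z-algorithm preprocessing by a direct per-shift prefix scan, filled
-- ascending with first-write-wins (objective: simpler; not faster).

-- ===== PORT A =====

-- Python list write `row[c] = v` / read `row[c]` for -75 ≤ c < 75 (negative index wraps);
-- exact on that range, which Pre_/Dom_ guarantee for the 75-wide rows used here.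
def pyColNat (c : Int) : Nat := (if c < 0 then c + 75 else c).toNat

def rowSet (row : List Int) (c : Int) (v : Int) : List Int := row.set (pyColNat c) v

def rowGet (row : List Int) (c : Int) : Int := (row.getD (pyColNat c) 0)

-- `SP[i][c] = v` on the 2-level table (row index i is nonnegative at every use site)
def tblSet (T : List (List Int)) (i : Nat) (c : Int) (v : Int) : List (List Int) :=
  T.set i (rowSet (T.getD i []) c v)

def colIdx (ch : Char) : Int := (ch.toNat : Int) - 48   -- Python: ord(ch) minus 48

-- the inner `while right<len and s[right]==s[right-left]: right+=1` of calculateZ;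
-- s.getD is exact here: Python indexes are in range at every reachable state
def zWhile (s : List Char) (left : Nat) (right : Nat) : Nat :=
  if h : right < s.length ∧ s.getD right 'a' = s.getD (right - left) 'a' then
    zWhile s left (right + 1)
  else right
termination_by s.length - right
decreasing_by omega

-- one iteration of calculateZ's `for k in range(1, len)` loop; state = (Z, left, right)
def calcZStep (s : List Char) (st : List Nat × Nat × Nat) (k : Nat) : List Nat × Nat × Nat :=
  let Z := st.1
  let left := st.2.1
  let right := st.2.2
  if right < k then                                   -- case 1 (k > right)
    let r := zWhile s k k
    (Z.set k (r - k), k, r - 1)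
  else
    let k1 := k - left
    if Z.getD k1 0 < right - k + 1 then               -- case 2a
      (Z.set k (Z.getD k1 0), left, right)
    else                                              -- case 2b
      let r := zWhile s k right
      (Z.set k (r - k), k, r - 1)

def calculateZ (s : List Char) : List Nat :=
  ((List.range' 1 (s.length - 1)).foldl (calcZStep s) (List.replicate s.length 0, 0, 0)).1

-- `for j in range(m-1,-1,-1)` with the `break`: recursion over [m-1,...,1,0] that stops
-- (returns SP) when i == -1; i.toNat is exact because the branch guarantees 0 ≤ i.
def fillA (s : List Char) (z : List Nat) : List Nat → List (List Int) → List (List Int)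
  | [], SP => SP
  | j :: js, SP =>
    let zj := z.getD j 0
    let i : Int := (j : Int) + (zj : Int) - 1
    if i = -1 then SP
    else fillA s z js (tblSet SP i.toNat (colIdx (s.getD zj 'a')) (zj : Int))

def computeSPx (pat : String) : List (List Int) :=
  let s := pat.toList
  let m := s.length
  let z := calculateZ s
  fillA s z (List.range m).reverse (List.replicate m (List.replicate 75 0))

-- ===== PORT B =====

-- `L = 0; while j+L < m and pat[j+L] == pat[L]: L += 1` (indexes in range whenever read)
def lcpAt (s : List Char) (j : Nat) (L : Nat) : Nat :=
  if h : j + L < s.length ∧ s.getD (j + L) 'a' = s.getD L 'a' then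
    lcpAt s j (L + 1)
  else L
termination_by s.length - (j + L)
decreasing_by omega

def computeSPx_alt (pat : String) : List (List Int) :=
  let s := pat.toList
  let m := s.length
  (List.range' 1 (m - 1)).foldl (fun SP j =>
      let L := lcpAt s j 0
      if 0 < L then
        let c := colIdx (s.getD L 'a')
        if rowGet (SP.getD (j + L - 1) []) c = 0 then
          tblSet SP (j + L - 1) c (L : Int)
        else SP
      else SP)
    (List.replicate m (List.replicate 75 0))

-- ===== PRECONDITION & SPEC =====
-- Pre_ excludes patterns containing a character with code above 122: for such patterns
-- the column index (ord of the character minus 48) can reach 75 and Python's row write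
-- raises IndexError; on a few such inputs A never performs the bad write and still
-- returns (see the excluded example in the claim), and B returns the same value there.
def Pre_computeSPx (pat : String) : Prop := pat.toList.all (fun c => c.toNat ≤ 122) = true
instance (pat : String) : Decidable (Pre_computeSPx pat) := by unfold Pre_computeSPx; infer_instance

def pvWitness_computeSPx : String := "ab"

def Spec_computeSPx (pat : String) (out : List (List Int)) : Prop := out = computeSPx_alt pat
instance (pat : String) (out : List (List Int)) : Decidable (Spec_computeSPx pat out) := by unfold Spec_computeSPx; infer_instance

-- ===== CLAIM (what is proved, stated in full; the proofs are below) =====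
def Claim_equal_computeSPx : Prop := ∀ (pat : String), Dom_computeSPx pat → Pre_computeSPx pat → Spec_computeSPx pat (computeSPx pat)

-- ===== LEMMAS AND PROOFS =====

theorem lcpAt_match (s : List Char) (j L : Nat) :
    ∀ t, L ≤ t → t < lcpAt s j L → j + t < s.length ∧ s.getD (j + t) 'a' = s.getD t 'a' := by
  induction L using lcpAt.induct (s := s) (j := j) with
  | case1 L h ih =>
    intro t h1 h2
    rw [lcpAt, dif_pos h] at h2
    rcases Nat.eq_or_lt_of_le h1 with rfl | hlt
    · exact h
    · exact ih t hlt h2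
  | case2 L h =>
    intro t h1 h2
    rw [lcpAt, dif_neg h] at h2; omega

theorem lcpAt_exit (s : List Char) (j L : Nat) :
    ¬ (j + lcpAt s j L < s.length ∧ s.getD (j + lcpAt s j L) 'a' = s.getD (lcpAt s j L) 'a') := by
  induction L using lcpAt.induct (s := s) (j := j) with
  | case1 L h ih => rw [lcpAt, dif_pos h]; exact ih
  | case2 L h => rw [lcpAt, dif_neg h]; exact h

theorem lcpAt_unique (s : List Char) (j L d : Nat) (hL : L ≤ d)
    (hmatch : ∀ t, L ≤ t → t < d → j + t < s.length ∧ s.getD (j + t) 'a' = s.getD t 'a')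
    (hexit : ¬ (j + d < s.length ∧ s.getD (j + d) 'a' = s.getD d 'a')) :
    lcpAt s j L = d := by
  revert hL hmatch
  induction L using lcpAt.induct (s := s) (j := j) with
  | case1 L h ih =>
    intro hL hmatch
    rw [lcpAt, dif_pos h]
    rcases Nat.eq_or_lt_of_le hL with rfl | hlt
    · exact absurd h hexit
    · exact ih (by omega) (fun t ht1 ht2 => hmatch t (by omega) ht2)
  | case2 L h =>
    intro hL hmatch
    rw [lcpAt, dif_neg h]
    rcases Nat.eq_or_lt_of_le hL with rfl | hlt
    · rfl
    · exact absurd (hmatch L le_rfl hlt) h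

def zf (s : List Char) (j : Nat) : Nat := lcpAt s j 0

theorem zf_le (s : List Char) (j : Nat) : j + zf s j ≤ s.length ∨ zf s j = 0 := by
  rcases Nat.eq_zero_or_pos (zf s j) with h | h
  · exact Or.inr h
  · left
    have := (lcpAt_match s j 0 (zf s j - 1) (Nat.zero_le _) (by unfold zf at *; omega)).1
    omega
theorem zWhile_eq (s : List Char) (left right : Nat) (h1 : left ≤ right) (h2 : right ≤ s.length)
    (hm : ∀ t, t < right - left → s.getD (left + t) 'a' = s.getD t 'a') :
    zWhile s left right = left + zf s left := by
  revert h1 h2 hm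
  induction right using zWhile.induct (s := s) (left := left) with
  | case1 right h ih =>
    intro h1 h2 hm
    rw [zWhile, dif_pos h]
    apply ih (by omega) (by omega)
    intro t ht
    rcases Nat.lt_or_ge t (right - left) with hlt | hge
    · exact hm t hlt
    · have hteq : t = right - left := by omega
      have : left + t = right := by omega
      rw [this, hteq]
      exact h.2
  | case2 right h =>
    intro h1 h2 hm
    rw [zWhile, dif_neg h]
    -- right - left is exactly zf left
    have hexit : ¬ (left + (right - left) < s.length ∧
        s.getD (left + (right - left)) 'a' = s.getD (right - left) 'a') := by
      have : left + (right - left) = right := by omega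
      rw [this]; exact h
    have := lcpAt_unique s left 0 (right - left) (Nat.zero_le _)
      (fun t _ ht => ⟨by omega, hm t ht⟩) hexit
    unfold zf; omega
theorem getD_set' {α : Type} (l : List α) (i j : Nat) (v d : α) :
    (l.set i v).getD j d = if i = j ∧ i < l.length then v else l.getD j d := by
  simp only [List.getD_eq_getElem?_getD, List.getElem?_set]
  by_cases hij : i = j
  · subst hij
    by_cases hl : i < l.length
    · simp [hl]
    · simp [hl]
  · simp [hij]

theorem zbox_window (s : List Char) (l : Nat) :
    ∀ u, u < zf s l → l + u < s.length ∧ s.getD (l + u) 'a' = s.getD u 'a' :=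
  fun u hu => lcpAt_match s l 0 u (Nat.zero_le _) hu

theorem case2a (s : List Char) (l R k : Nat) (hbox : R + 1 = l + zf s l) (hk : l < k)
    (hf : zf s (k - l) + k ≤ R) : zf s k = zf s (k - l) := by
  set k1 := k - l with hk1
  set d := zf s k1 with hd
  have hW := zbox_window s l
  have hm1 := lcpAt_match s k1 0
  have hRl : R - l + 1 = zf s l := by
    have : 1 ≤ zf s l := by omega
    omega
  apply lcpAt_unique s k 0 d (Nat.zero_le _)
  · intro t _ ht
    have h1 := hm1 t (Nat.zero_le _) ht
    have hw : k1 + t < zf s l := by omega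
    have h2 := hW (k1 + t) hw
    have hkt : l + (k1 + t) = k + t := by omega
    rw [hkt] at h2
    exact ⟨h2.1, by rw [h2.2]; exact h1.2⟩
  · intro hcontra
    have hx : ¬ (k1 + d < s.length ∧ s.getD (k1 + d) 'a' = s.getD d 'a') := lcpAt_exit s k1 0
    have hw : k1 + d < zf s l := by omega
    have h2 := hW (k1 + d) hw
    have hkt : l + (k1 + d) = k + d := by omega
    rw [hkt] at h2
    exact hx ⟨by have := hcontra.1; omega, by rw [← h2.2]; exact hcontra.2⟩

theorem case2b (s : List Char) (l R k : Nat) (_hl : 1 ≤ l) (hbox : R + 1 = l + zf s l)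
    (hk : l < k) (hkR : k ≤ R) (hf : R < zf s (k - l) + k) :
    zWhile s k R = k + zf s k ∧ R < s.length := by
  set k1 := k - l with hk1
  have hW := zbox_window s l
  have hm1 : ∀ t, 0 ≤ t → t < zf s k1 → k1 + t < s.length ∧ s.getD (k1 + t) 'a' = s.getD t 'a' :=
    lcpAt_match s k1 0
  have hzl : 1 ≤ zf s l := by omega
  have hRn : R < s.length := by
    rcases zf_le s l with h | h
    · omega
    · omega
  refine ⟨zWhile_eq s k R hkR (by omega) ?_, hRn⟩
  intro t ht
  have h1 := hm1 t (Nat.zero_le _) (by omega)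
  have hw : k1 + t < zf s l := by omega
  have h2 := hW (k1 + t) hw
  have hkt : l + (k1 + t) = k + t := by omega
  rw [hkt] at h2
  rw [h2.2]; exact h1.2
def goodZ (s : List Char) (k : Nat) (st : List Nat × Nat × Nat) : Prop :=
  st.1.length = s.length ∧
  (∀ t, t < s.length → st.1.getD t 0 = if 1 ≤ t ∧ t ≤ k then zf s t else 0) ∧
  ((st.2.1 = 0 ∧ st.2.2 = 0 ∧ k = 0) ∨
   (1 ≤ st.2.1 ∧ st.2.1 ≤ k ∧ st.2.2 + 1 = st.2.1 + zf s st.2.1))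

theorem calcZ_inv_step (s : List Char) (k : Nat) (hk : k + 1 < s.length)
    (st : List Nat × Nat × Nat) (h : goodZ s k st) :
    goodZ s (k + 1) (calcZStep s st (k + 1)) := by
  obtain ⟨hlen, hZ, hbox⟩ := h
  obtain ⟨Z, l, R⟩ := st
  simp only at hlen hZ hbox
  unfold calcZStep
  simp only
  by_cases h1 : R < k + 1
  · rw [if_pos h1]
    have hr : zWhile s (k + 1) (k + 1) = (k + 1) + zf s (k + 1) :=
      zWhile_eq s (k + 1) (k + 1) le_rfl (by omega) (fun t ht => by omega)
    rw [hr]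
    unfold goodZ
    refine ⟨by simpa using hlen, ?_, ?_⟩
    · intro t ht
      simp only
      rw [getD_set']
      by_cases he : t = k + 1
      · subst he
        rw [if_pos ⟨rfl, by omega⟩, if_pos (by omega)]
        omega
      · rw [if_neg (by omega), hZ t ht]
        congr 1
        simp only [eq_iff_iff]
        omega
    · right
      simp only
      refine ⟨by omega, by omega, by omega⟩
  · rw [if_neg h1]
    have hkR : k + 1 ≤ R := by omega
    rcases hbox with ⟨_, hR0, _⟩ | ⟨hl1, hlk, hRbox⟩
    · omega
    have hk1b : 1 ≤ (k + 1) - l ∧ (k + 1) - l ≤ k := by omega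
    have hZk1 : Z.getD ((k + 1) - l) 0 = zf s ((k + 1) - l) := by
      rw [hZ _ (by omega)]; rw [if_pos (by omega)]
    by_cases h2 : Z.getD ((k + 1) - l) 0 < R - (k + 1) + 1
    · rw [if_pos h2]
      rw [hZk1] at h2
      have heq : zf s (k + 1) = zf s ((k + 1) - l) :=
        case2a s l R (k + 1) hRbox (by omega) (by omega)
      unfold goodZ
      refine ⟨by simpa using hlen, ?_, ?_⟩
      · intro t ht
        simp only
        rw [hZk1, getD_set']
        by_cases he : t = k + 1
        · subst he
          rw [if_pos ⟨rfl, by omega⟩, if_pos (by omega), heq]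
        · rw [if_neg (by omega), hZ t ht]
          congr 1
          simp only [eq_iff_iff]
          omega
      · right
        simp only
        exact ⟨hl1, by omega, hRbox⟩
    · rw [if_neg h2]
      rw [hZk1] at h2
      obtain ⟨hr, hRn⟩ := case2b s l R (k + 1) hl1 hRbox (by omega) hkR (by omega)
      rw [hr]
      unfold goodZ
      refine ⟨by simpa using hlen, ?_, ?_⟩
      · intro t ht
        simp only
        rw [getD_set']
        by_cases he : t = k + 1
        · subst he
          rw [if_pos ⟨rfl, by omega⟩, if_pos (by omega)]
          omega
        · rw [if_neg (by omega), hZ t ht]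
          congr 1
          simp only [eq_iff_iff]
          omega
      · right
        simp only
        refine ⟨by omega, by omega, by omega⟩

theorem calcZ_inv (s : List Char) :
    ∀ k, k + 1 ≤ s.length →
      goodZ s k ((List.range' 1 k).foldl (calcZStep s) (List.replicate s.length 0, 0, 0)) := by
  intro k
  induction k with
  | zero =>
    intro _
    refine ⟨by simp, ?_, Or.inl ⟨rfl, rfl, rfl⟩⟩
    intro t ht
    simp [List.getD_eq_getElem?_getD, ht]
    omega
  | succ k ih =>
    intro hk
    have hrg : List.range' 1 (k + 1) = List.range' 1 k ++ [1 + 1 * k] := List.range'_concat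
    rw [hrg, List.foldl_append]
    simp only [List.foldl_cons, List.foldl_nil]
    have h1k : 1 + 1 * k = k + 1 := by omega
    rw [h1k]
    exact calcZ_inv_step s k (by omega) _ (ih (by omega))

theorem calculateZ_correct (s : List Char) :
    (calculateZ s).length = s.length ∧
    ∀ t, t < s.length → (calculateZ s).getD t 0 = if 1 ≤ t then zf s t else 0 := by
  rcases Nat.eq_zero_or_pos s.length with h0 | h0
  · constructor
    · simp [calculateZ, h0]
    · intro t ht; omega
  · have := calcZ_inv s (s.length - 1) (by omega)
    obtain ⟨hlen, hZ, _⟩ := this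
    unfold calculateZ
    refine ⟨hlen, ?_⟩
    intro t ht
    rw [hZ t ht]
    congr 1
    simp only [eq_iff_iff]
    omega
def get2 (T : List (List Int)) (i p : Nat) : Int := (T.getD i []).getD p 0

theorem getD_mem {α : Type} (l : List α) (i : Nat) (d : α) (h : i < l.length) :
    l.getD i d ∈ l := by
  rw [List.getD_eq_getElem l d h]
  exact List.getElem_mem h

theorem get2_tblSet_self (T : List (List Int)) (i : Nat) (c v : Int)
    (hT : ∀ r ∈ T, r.length = 75) (hi : i < T.length) (hp : pyColNat c < 75) :
    get2 (tblSet T i c v) i (pyColNat c) = v := by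
  unfold get2 tblSet
  rw [getD_set', if_pos ⟨rfl, hi⟩]
  unfold rowSet
  have hlen : (T.getD i []).length = 75 := hT _ (getD_mem T i [] hi)
  rw [getD_set', if_pos ⟨rfl, by rw [hlen]; exact hp⟩]

theorem get2_tblSet_ne (T : List (List Int)) (i : Nat) (c v : Int) (i' p' : Nat)
    (hne : ¬ (i = i' ∧ pyColNat c = p')) :
    get2 (tblSet T i c v) i' p' = get2 T i' p' := by
  unfold get2 tblSet
  rw [getD_set']
  by_cases he : i = i' ∧ i < T.length
  · rw [if_pos he]
    unfold rowSet
    rw [getD_set', if_neg (by rw [he.1] at hne; tauto), he.1]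
  · rw [if_neg he]

theorem tblSet_length (T : List (List Int)) (i : Nat) (c v : Int) :
    (tblSet T i c v).length = T.length := by
  unfold tblSet; simp

theorem tblSet_rows (T : List (List Int)) (i : Nat) (c v : Int)
    (hT : ∀ r ∈ T, r.length = 75) : ∀ r ∈ tblSet T i c v, r.length = 75 := by
  intro r hr
  by_cases hi : i < T.length
  · rcases List.mem_or_eq_of_mem_set hr with h | rfl
    · exact hT r h
    · unfold rowSet
      rw [List.length_set]
      exact hT _ (getD_mem T i [] hi)
  · unfold tblSet at hr
    rw [List.set_eq_of_length_le (by omega)] at hr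
    exact hT r hr
def posL (s : List Char) (L : Nat) : Nat := pyColNat (colIdx (s.getD L 'a'))
def condb (s : List Char) (j i p : Nat) : Bool :=
  decide (0 < zf s j ∧ j + zf s j = i + 1 ∧ posL s (zf s j) = p)

theorem fillA_entry (s : List Char) (z : List Nat)
    (hz : ∀ j, 1 ≤ j → j < s.length → z.getD j 0 = zf s j)
    (hpos : ∀ L, posL s L < 75) :
    ∀ (k : Nat), k < s.length → ∀ (T : List (List Int)), T.length = s.length →
    (∀ r ∈ T, r.length = 75) →
    ∀ i p, i < s.length → p < 75 →
    get2 (fillA s z ((List.range' 1 k).reverse) T) i p =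
      (match (List.range' 1 k).find? (fun j => condb s j i p) with
       | some j => (zf s j : Int)
       | none => if (∃ j ∈ List.range' 1 k, zf s j = 0 ∧ j = i + 1) ∧ p = posL s 0
                 then 0 else get2 T i p) := by
  intro k
  induction k with
  | zero =>
    intro _ T _ _ i p _ _
    simp [fillA]
  | succ k ih =>
    intro hk T hTlen hTrows i p hi hp
    have hrg : List.range' 1 (k + 1) = List.range' 1 k ++ [1 + 1 * k] := List.range'_concat
    have h1k : 1 + 1 * k = k + 1 := by omega
    rw [h1k] at hrg
    rw [hrg, List.reverse_append]
    simp only [List.reverse_cons, List.reverse_nil, List.nil_append, List.singleton_append]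
    have hzk : z.getD (k + 1) 0 = zf s (k + 1) := hz (k + 1) (by omega) hk
    rw [fillA]
    simp only [hzk]
    rw [if_neg (by omega)]
    have htn : (((k + 1 : Nat) : Int) + ((zf s (k + 1) : Nat) : Int) - 1).toNat
        = k + zf s (k + 1) := by omega
    rw [htn]
    set v := zf s (k + 1) with hv
    set T' := tblSet T (k + v) (colIdx (s.getD v 'a')) (v : Int) with hT'
    have hT'len : T'.length = s.length := by rw [hT', tblSet_length, hTlen]
    have hT'rows : ∀ r ∈ T', r.length = 75 := tblSet_rows T _ _ _ hTrows
    have hIH := ih (by omega) T' hT'len hT'rows i p hi hp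
    rw [hIH]
    have hfind : (List.range' 1 k ++ [k + 1]).find? (fun j => condb s j i p) =
        ((List.range' 1 k).find? (fun j => condb s j i p)).or
          (if condb s (k + 1) i p then some (k + 1) else none) := by
      rw [List.find?_append]
      rcases h : (List.range' 1 k).find? (fun j => condb s j i p) with _ | j
      · simp [List.find?_singleton]
      · simp
    rw [hfind]
    rcases hcase : (List.range' 1 k).find? (fun j => condb s j i p) with _ | j
    case some =>
      simp only [Option.some_or]
    case none =>
      simp only [Option.none_or]
      rcases Nat.eq_zero_or_pos v with hv0 | hvpos
      · -- v = 0 : A writes 0 at row k, physical column posL s 0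
        have hcondk : condb s (k + 1) i p = false := by
          simp only [condb, ← hv, hv0, decide_eq_false_iff_not]
          omega
        rw [hcondk]
        simp only [Bool.false_eq_true, if_false]
        have hcol0 : colIdx (s.getD v 'a') = colIdx (s.getD 0 'a') := by rw [hv0]
        by_cases hclause : (∃ j ∈ List.range' 1 k, zf s j = 0 ∧ j = i + 1) ∧ p = posL s 0
        · obtain ⟨⟨j, hj1, hj2⟩, hj3⟩ := hclause
          rw [if_pos ⟨⟨j, hj1, hj2⟩, hj3⟩,
              if_pos ⟨⟨j, List.mem_append_left _ hj1, hj2⟩, hj3⟩]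
        · rw [if_neg hclause]
          by_cases hip : i = k ∧ p = posL s 0
          · obtain ⟨hik, hpp⟩ := hip
            subst hik
            rw [hpp]
            have hz2 : get2 T' i (posL s 0) = (0 : Int) := by
              rw [hT', hcol0, hv0]
              have hadd : i + 0 = i := by omega
              rw [hadd]
              have := get2_tblSet_self T i (colIdx (s.getD 0 'a')) ((0 : Nat) : Int)
                (hTrows) (by omega) (hpos 0)
              simpa [posL] using this
            rw [hz2, if_pos ?_]
            refine ⟨⟨i + 1, List.mem_append_right _ (by simp), by rw [← hv]; exact hv0, rfl⟩, rfl⟩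
          · have hne : get2 T' i p = get2 T i p := by
              rw [hT']
              refine get2_tblSet_ne T _ _ _ i p ?_
              intro ⟨h1, h2⟩
              rw [hcol0] at h2
              exact hip ⟨by omega, by rw [← h2]; rfl⟩
            rw [hne, if_neg ?_]
            intro ⟨⟨j, hj1, hj2, hj3⟩, hj4⟩
            rcases List.mem_append.1 hj1 with h | h
            · exact hclause ⟨⟨j, h, hj2, hj3⟩, hj4⟩
            · simp only [List.mem_singleton] at h
              exact hip ⟨by omega, hj4⟩
      · -- v > 0 : A writes v at row k+v, physical column posL s v
        by_cases hcondk : condb s (k + 1) i p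
        · rw [hcondk]
          simp only [if_true]
          have hcd := of_decide_eq_true hcondk
          obtain ⟨_, hsum, hcol⟩ := hcd
          rw [← hv] at hsum hcol
          have hik : i = k + v := by omega
          have hz3 : get2 T' i p = (v : Int) := by
            rw [hT', hik, ← hcol]
            exact get2_tblSet_self T (k + v) _ _ hTrows (by rw [hTlen]; omega) (hpos v)
          rw [if_neg ?_, hz3]
          intro ⟨⟨j, hj1, hj2, hj3⟩, _⟩
          have := (List.mem_range'_1.1 hj1).2
          omega
        · rw [Bool.not_eq_true] at hcondk
          rw [hcondk]
          simp only [Bool.false_eq_true, if_false]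
          have hne : get2 T' i p = get2 T i p := by
            rw [hT']
            refine get2_tblSet_ne T _ _ _ i p ?_
            intro ⟨h1, h2⟩
            have : condb s (k + 1) i p = true := by
              simp only [condb, ← hv, decide_eq_true_eq]
              exact ⟨hvpos, by omega, h2⟩
            simp [this] at hcondk
          rw [hne]
          have hex : ((∃ j ∈ List.range' 1 k ++ [k + 1], zf s j = 0 ∧ j = i + 1) ∧ p = posL s 0)
              ↔ ((∃ j ∈ List.range' 1 k, zf s j = 0 ∧ j = i + 1) ∧ p = posL s 0) := by
            constructor
            · rintro ⟨⟨j, hj1, hj2, hj3⟩, hj4⟩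
              rcases List.mem_append.1 hj1 with h | h
              · exact ⟨⟨j, h, hj2, hj3⟩, hj4⟩
              · simp only [List.mem_singleton] at h
                subst h
                rw [← hv] at hj2
                omega
            · rintro ⟨⟨j, hj1, hj2, hj3⟩, hj4⟩
              exact ⟨⟨j, List.mem_append_left _ hj1, hj2, hj3⟩, hj4⟩
          rw [if_congr hex rfl rfl]
theorem fillB_entry (s : List Char) (hpos : ∀ L, posL s L < 75) :
    ∀ (js : List Nat) (T : List (List Int)), T.length = s.length →
    (∀ r ∈ T, r.length = 75) →
    ∀ i p, i < s.length → p < 75 →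
    get2 (js.foldl (fun SP j =>
      let L := lcpAt s j 0
      if 0 < L then
        let c := colIdx (s.getD L 'a')
        if rowGet (SP.getD (j + L - 1) []) c = 0 then
          tblSet SP (j + L - 1) c (L : Int)
        else SP
      else SP) T) i p =
      if get2 T i p = 0 then
        (match js.find? (fun j => condb s j i p) with
         | some j => (zf s j : Int)
         | none => get2 T i p)
      else get2 T i p := by
  intro js
  induction js with
  | nil =>
    intro T _ _ i p _ _
    simp only [List.foldl_nil, List.find?_nil]
    split <;> rfl
  | cons j rest ih =>
    intro T hTlen hTrows i p hi hp
    simp only [List.foldl_cons, List.find?_cons]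
    have hL : lcpAt s j 0 = zf s j := rfl
    by_cases hv : 0 < zf s j
    · rw [hL, if_pos hv]
      set v := zf s j with hvv
      set i0 := j + v - 1 with hi0
      set c := colIdx (s.getD v 'a') with hc
      have hrg : rowGet (T.getD i0 []) c = get2 T i0 (pyColNat c) := rfl
      have hi0n : i0 < s.length := by
        rcases zf_le s j with h | h
        · omega
        · omega
      have hpc : pyColNat c = posL s v := rfl
      by_cases hz0 : rowGet (T.getD i0 []) c = 0
      · rw [if_pos hz0]
        set T' := tblSet T i0 c (v : Int) with hT'
        have hT'len : T'.length = s.length := by rw [hT', tblSet_length, hTlen]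
        have hT'rows : ∀ r ∈ T', r.length = 75 := tblSet_rows T _ _ _ hTrows
        rw [ih T' hT'len hT'rows i p hi hp]
        by_cases hcond : condb s j i p
        · -- this write lands exactly at (i, p)
          have hcd := of_decide_eq_true hcond
          obtain ⟨_, hsum, hcol⟩ := hcd
          rw [← hvv] at hsum hcol
          have hik : i = i0 := by omega
          have hpk : p = pyColNat c := by rw [hpc]; omega
          have hw : get2 T' i p = (v : Int) := by
            rw [hT', hik, hpk]
            exact get2_tblSet_self T i0 c _ hTrows (by omega) (by rw [hpc]; exact hpos v)
          rw [hcond]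
          have hslot : get2 T i p = 0 := by
            rw [hik, hpk, ← hrg]
            exact hz0
          rw [if_neg (by rw [hw]; exact_mod_cast (by omega : (v : Int) ≠ 0)), hw,
              if_pos hslot]
        · -- the write (if any) is at a different entry
          rw [Bool.not_eq_true] at hcond
          rw [hcond]
          have hne : get2 T' i p = get2 T i p := by
            rw [hT']
            refine get2_tblSet_ne T _ _ _ i p ?_
            intro ⟨h1, h2⟩
            have : condb s j i p = true := by
              simp only [condb, ← hvv, decide_eq_true_eq]
              refine ⟨hv, by omega, by rw [← h2, hpc]⟩
            simp [this] at hcond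
          rw [hne]
      · rw [if_neg hz0]
        by_cases hcond : condb s j i p
        · have hcd := of_decide_eq_true hcond
          obtain ⟨_, hsum, hcol⟩ := hcd
          rw [← hvv] at hsum hcol
          have hik : i = i0 := by omega
          have hpk : p = pyColNat c := by rw [hpc]; omega
          have hslot : get2 T i p ≠ 0 := by
            rw [hik, hpk, ← hrg]
            exact hz0
          rw [ih T hTlen hTrows i p hi hp]
          rw [if_neg hslot, if_neg hslot]
        · rw [Bool.not_eq_true] at hcond
          rw [hcond]
          exact ih T hTlen hTrows i p hi hp
    · rw [hL, if_neg hv]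
      have hcond : condb s j i p = false := by
        simp only [condb, decide_eq_false_iff_not]
        omega
      rw [hcond]
      exact ih T hTlen hTrows i p hi hp
theorem fillA_drop0 (s : List Char) (z : List Nat) (hz0 : z.getD 0 0 = 0) :
    ∀ (l : List Nat), (∀ j ∈ l, 1 ≤ j) → ∀ T, fillA s z (l ++ [0]) T = fillA s z l T := by
  intro l
  induction l with
  | nil =>
    intro _ T
    simp only [List.nil_append]
    rw [fillA]
    have hz0' : z[0]?.getD 0 = 0 := by simpa [List.getD_eq_getElem?_getD] using hz0
    simp [fillA, List.getD_eq_getElem?_getD, hz0']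
  | cons j rest ih =>
    intro hmem T
    simp only [List.cons_append]
    rw [fillA, fillA]
    have hj : 1 ≤ j := hmem j List.mem_cons_self
    split
    · rfl
    · exact ih (fun x hx => hmem x (List.mem_cons_of_mem _ hx)) _

theorem fillA_dims (s : List Char) (z : List Nat) :
    ∀ (l : List Nat) (T : List (List Int)),
      (fillA s z l T).length = T.length ∧
      ((∀ r ∈ T, r.length = 75) → ∀ r ∈ fillA s z l T, r.length = 75) := by
  intro l
  induction l with
  | nil => intro T; rw [fillA]; exact ⟨rfl, fun h => h⟩
  | cons j rest ih =>
    intro T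
    rw [fillA]
    split
    · exact ⟨rfl, fun h => h⟩
    · obtain ⟨h1, h2⟩ := ih (tblSet T _ _ _)
      refine ⟨by rw [h1, tblSet_length], fun h => h2 (tblSet_rows T _ _ _ h)⟩

theorem fillB_dims (s : List Char) :
    ∀ (js : List Nat) (T : List (List Int)),
      ((js.foldl (fun SP j =>
        let L := lcpAt s j 0
        if 0 < L then
          let c := colIdx (s.getD L 'a')
          if rowGet (SP.getD (j + L - 1) []) c = 0 then
            tblSet SP (j + L - 1) c (L : Int)
          else SP
        else SP) T)).length = T.length ∧
      ((∀ r ∈ T, r.length = 75) → ∀ r ∈ (js.foldl (fun SP j =>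
        let L := lcpAt s j 0
        if 0 < L then
          let c := colIdx (s.getD L 'a')
          if rowGet (SP.getD (j + L - 1) []) c = 0 then
            tblSet SP (j + L - 1) c (L : Int)
          else SP
        else SP) T), r.length = 75) := by
  intro js
  induction js with
  | nil => intro T; exact ⟨rfl, fun h => h⟩
  | cons j rest ih =>
    intro T
    simp only [List.foldl_cons]
    split
    · split
      · obtain ⟨h1, h2⟩ := ih (tblSet T _ _ _)
        refine ⟨by rw [h1, tblSet_length], fun h => h2 (tblSet_rows T _ _ _ h)⟩
      · exact ih T
    · exact ih T

theorem get2_zero (n i p : Nat) : get2 (List.replicate n (List.replicate 75 (0 : Int))) i p = 0 := by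
  simp only [get2, List.getD_eq_getElem?_getD, List.getElem?_replicate]
  split
  · simp only [Option.getD_some, List.getElem?_replicate]
    split <;> simp
  · simp

-- ===== VERDICT (by name: the statement is the Claim_ definition above) =====
theorem computeSPx_spec : Claim_equal_computeSPx := by
  intro pat hdom hpre
  unfold Spec_computeSPx computeSPx computeSPx_alt
  set s := pat.toList with hs
  simp only
  have hchar : ∀ L, 9 ≤ (s.getD L 'a').toNat ∧ (s.getD L 'a').toNat ≤ 122 := by
    intro L
    by_cases hL : L < s.length
    · have hmem := getD_mem s L 'a' hL
      have h1 : pvDomChar (s.getD L 'a') = true := by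
        unfold Dom_computeSPx pvDomStr at hdom
        rw [List.all_eq_true] at hdom
        exact hdom _ hmem
      have h2 : (s.getD L 'a').toNat ≤ 122 := by
        unfold Pre_computeSPx at hpre
        rw [List.all_eq_true] at hpre
        simpa using hpre _ hmem
      unfold pvDomChar at h1
      simp only [Bool.or_eq_true, Bool.and_eq_true, decide_eq_true_eq, beq_iff_eq] at h1
      omega
    · rw [List.getD_eq_getElem?_getD, List.getElem?_eq_none (by omega), Option.getD_none]
      decide
  have hpos : ∀ L, posL s L < 75 := by
    intro L
    have := hchar L
    unfold posL pyColNat colIdx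
    omega
  obtain ⟨hzlen, hzval⟩ := calculateZ_correct s
  have hz : ∀ j, 1 ≤ j → j < s.length → (calculateZ s).getD j 0 = zf s j := by
    intro j h1 h2; rw [hzval j h2, if_pos h1]
  rcases Nat.eq_zero_or_pos s.length with h0 | h0
  · rw [h0]
    simp [fillA]
  obtain ⟨m, hm⟩ : ∃ m, s.length = m + 1 := ⟨s.length - 1, by omega⟩
  have hz0 : (calculateZ s).getD 0 0 = 0 := by rw [hzval 0 (by omega)]; simp
  have hlist : (List.range s.length).reverse = (List.range' 1 (s.length - 1)).reverse ++ [0] := by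
    rw [hm, List.range_eq_range', List.range'_succ]
    simp
  rw [hlist,
      fillA_drop0 s _ hz0 _ (fun j hj => (List.mem_range'_1.1 (List.mem_reverse.1 hj)).1) _]
  set init := List.replicate s.length (List.replicate 75 (0 : Int)) with hinit
  have hinitlen : init.length = s.length := by rw [hinit, List.length_replicate]
  have hinitrows : ∀ r ∈ init, r.length = 75 := by
    intro r hr
    rw [List.eq_of_mem_replicate hr, List.length_replicate]
  have hAd := fillA_dims s (calculateZ s) ((List.range' 1 (s.length - 1)).reverse) init
  have hBd := fillB_dims s (List.range' 1 (s.length - 1)) init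
  apply List.ext_getElem (by rw [hAd.1, hBd.1])
  intro i h1 h2
  have hin : i < s.length := by rw [← hinitlen, ← hAd.1]; exact h1
  have hArows := hAd.2 hinitrows
  have hBrows := hBd.2 hinitrows
  apply List.ext_getElem (by rw [hArows _ (List.getElem_mem h1), hBrows _ (List.getElem_mem h2)])
  intro p hp1 hp2
  have hpn : p < 75 := by rw [hArows _ (List.getElem_mem h1)] at hp1; exact hp1
  have hA := fillA_entry s (calculateZ s) hz hpos (s.length - 1) (by omega) init
    hinitlen hinitrows i p hin hpn
  have hB := fillB_entry s hpos (List.range' 1 (s.length - 1)) init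
    hinitlen hinitrows i p hin hpn
  have hget : ∀ (T : List (List Int)) (hh1 : i < T.length) (hhp : p < (T[i]'hh1).length),
      (T[i]'hh1)[p]'hhp = get2 T i p := by
    intro T hh1 hhp
    unfold get2
    rw [List.getD_eq_getElem T [] hh1, List.getD_eq_getElem _ 0 hhp]
  rw [hget _ h1 hp1, hget _ h2 hp2, hA, hB]
  have gz : get2 init i p = 0 := get2_zero _ _ _
  rw [gz]
  rcases hF : (List.range' 1 (s.length - 1)).find? (fun j => condb s j i p) with _ | j
  · simp
  · simp
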